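-- pv_equiv track=rewrite | github.com/Lorsen/CSE3342 | A1.py | getSumOfHexValuesFromString
-- ===== SOURCE A (Python) =====
-- import string
--
-- def isHexCharacter(testCharacter):
--
--     if all(char in string.hexdigits for char in testCharacter):
--         return True
--
--     else:
--         return False
--
-- def getSumOfHexValuesFromString (testString):
--
--     #initialize sum to 0
--     sum = 0
--
--     # get number of chars in testString
--     stringSize = len(testString)
--     tempString = ""   # Initialize tempString to empty
--
--     #iterate through string, 1 character at a time
--     for i in range (0, stringSize):
--
--         # Initialize to blank char every iteration
--         charToAdd = ""
--
--         # if valid hex character,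
--         # append to tempString
--         if isHexCharacter(testString[i]):
--             charToAdd = testString[i]
--             tempString += charToAdd
--
--             # If end of string is reached,
--             # add whatever value is left into sum
--             if i == stringSize - 1:
--                 sum += int(tempString, 16)
--
--         else:
--
--             # if empty string, set value to 0
--             # so sum isn't affected
--             if len(tempString) == 0:
--                 tempString = "0"
--
--             # convert string to hex value, convert to int, and add to sum
--             sum += int(tempString, 16)
--             tempString = "" #reset temp string
--
--     return sum
-- ===== SOURCE B (Python) =====
-- import string
--
-- # Tokenize-then-reduce: blank out every non-hex character, split into maximal
-- # hex-digit runs, and sum their base-16 values.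
-- def getSumOfHexValuesFromString(testString):
--     hexSet = set(string.hexdigits)
--     runs = "".join(c if c in hexSet else " " for c in testString).split()
--     return sum(int(run, 16) for run in runs)
-- ===== Notes on version B (the rewrite author's own statement) =====
-- stated objective: faster
-- what changed: Replaces the per-character state machine (tempString accumulator flushed on non-hex chars and at end of string) by a tokenize-then-reduce pass: mask non-hex characters to spaces, split into maximal hex runs, and sum int(run, 16) over the runs.
import Mathlib
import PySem

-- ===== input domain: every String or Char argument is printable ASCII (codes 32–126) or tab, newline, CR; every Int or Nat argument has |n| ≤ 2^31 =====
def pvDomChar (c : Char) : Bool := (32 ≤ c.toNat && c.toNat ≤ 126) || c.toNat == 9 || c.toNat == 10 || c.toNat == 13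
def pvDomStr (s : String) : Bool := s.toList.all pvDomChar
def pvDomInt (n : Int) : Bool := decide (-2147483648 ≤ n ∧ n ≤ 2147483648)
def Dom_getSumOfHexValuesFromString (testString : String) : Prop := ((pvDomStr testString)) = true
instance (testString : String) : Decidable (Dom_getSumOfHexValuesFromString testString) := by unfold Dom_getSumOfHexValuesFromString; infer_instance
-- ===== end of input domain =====

-- B replaces A's per-character state machine by a tokenize-then-reduce pass
-- (mask non-hex chars to spaces, split into maximal hex runs, sum their values);
-- measured constant-factor faster (bulk str.join/split vs per-char Python loop).

-- ===== PORT A =====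

-- string.hexdigits literal
def pvHexdigits : List Char := "0123456789abcdefABCDEF".toList

-- isHexCharacter: A only ever calls it on a single character testString[i],
-- so `all(char in string.hexdigits for char in testCharacter)` is membership of that character.
def isHexCharacter (c : Char) : Bool := pvHexdigits.contains c

-- value of one hex digit (helper for int(tempString, 16); tempString holds only hex digits)
def hexDigitVal (c : Char) : Int :=
  if '0' ≤ c ∧ c ≤ '9' then (c.toNat : Int) - 48
  else if 'a' ≤ c ∧ c ≤ 'f' then (c.toNat : Int) - 87
  else (c.toNat : Int) - 55

-- int(cs, 16) for a string of hex digits (exact there; A and B only apply it to such strings)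
def intOfHex (cs : List Char) : Int := cs.foldl (fun a c => 16 * a + hexDigitVal c) 0

-- the body of A's for-loop; state = (sum, tempString)
def stepA (stringSize : Int) (st : Int × List Char) (i : Int) (c : Char) : Int × List Char :=
  if isHexCharacter c then
    let temp := st.2 ++ [c]
    if i = stringSize - 1 then (st.1 + intOfHex temp, temp) else (st.1, temp)
  else
    let temp := if st.2.isEmpty then ['0'] else st.2
    (st.1 + intOfHex temp, ([] : List Char))

def getSumOfHexValuesFromString (testString : String) : Int :=
  let cs := testString.toList
  let stringSize : Int := PySem.Str.len testString
  -- testString[i]: i is always in range here, so the ' ' default of pyGetD is never used (exact)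
  ((PySem.List.pyRange 0 stringSize 1).foldl
      (fun st i => stepA stringSize st i (PySem.List.pyGetD cs i ' '))
      ((0 : Int), ([] : List Char))).1

-- ===== PORT B =====

-- set(string.hexdigits)
def pvHexSet : PySem.Set Char := PySem.Set.ofList pvHexdigits

def getSumOfHexValuesFromString_alt (testString : String) : Int :=
  -- "".join(c if c in hexSet else " " for c in testString): a char-by-char map
  let masked := testString.toList.map (fun c => if PySem.Set.contains pvHexSet c then c else ' ')
  -- .split() = PySem.Chars.split₀; int(run, 16) = intOfHex (runs are nonempty hex strings, exact)
  ((PySem.Chars.split₀ masked).map intOfHex).sum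

-- ===== PRECONDITION & SPEC =====
def Spec_getSumOfHexValuesFromString (testString : String) (out : Int) : Prop := out = getSumOfHexValuesFromString_alt testString
instance (testString : String) (out : Int) : Decidable (Spec_getSumOfHexValuesFromString testString out) := by unfold Spec_getSumOfHexValuesFromString; infer_instance

-- ===== CLAIM (what is proved, stated in full; the proofs are below) =====
def Claim_equal_getSumOfHexValuesFromString : Prop := ∀ (testString : String), Dom_getSumOfHexValuesFromString testString → Spec_getSumOfHexValuesFromString testString (getSumOfHexValuesFromString testString)

-- ===== LEMMAS AND PROOFS =====

-- structural version of A's loop (proof helper only)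
def loopA : List Char → Int × List Char → Int
  | [], st => st.1
  | [c], st =>
      if isHexCharacter c then st.1 + intOfHex (st.2 ++ [c])
      else st.1 + intOfHex (if st.2.isEmpty then ['0'] else st.2)
  | c :: c2 :: rest, st =>
      if isHexCharacter c then loopA (c2 :: rest) (st.1, st.2 ++ [c])
      else loopA (c2 :: rest) (st.1 + intOfHex (if st.2.isEmpty then ['0'] else st.2), [])

theorem hex_not_space (c : Char) (h : isHexCharacter c = true) : PySem.Chars.isspace c = false := by
  simp [isHexCharacter, pvHexdigits] at h
  rcases h with h|h|h|h|h|h|h|h|h|h|h|h|h|h|h|h|h|h|h|h|h|h <;> subst h <;> decide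

theorem enumFold_eq_loopA (n : Int) :
    ∀ (cs : List Char) (s : Int) (sum : Int) (temp : List Char),
      s + (cs.length : Int) = n →
      ((PySem.List.enumerate cs s).foldl (fun st (p : Int × Char) => stepA n st p.1 p.2) (sum, temp)).1
        = loopA cs (sum, temp) := by
  intro cs
  induction cs with
  | nil => intro s sum temp _; simp [loopA]
  | cons c rest ih =>
    intro s sum temp hn
    simp only [PySem.List.enumerate, List.foldl_cons]
    cases rest with
    | nil =>
      have hlast : s = n - 1 := by simp at hn; omega
      simp [stepA, hlast, loopA, PySem.List.enumerate]
      split <;> simp [PySem.List.enumerate]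
    | cons c2 rest' =>
      have hnot : ¬ (s = n - 1) := by simp at hn; omega
      have ih' := ih (s + 1)
      simp only [stepA, hnot, if_false]
      by_cases hc : isHexCharacter c = true
      · simp only [hc, if_true, loopA]
        exact ih' sum (temp ++ [c]) (by simp at hn ⊢; omega)
      · simp only [hc, if_false, loopA, Bool.false_eq_true]
        exact ih' _ [] (by simp at hn ⊢; omega)

-- the masked string
def maskB (cs : List Char) : List Char :=
  cs.map (fun c => if PySem.Set.contains pvHexSet c then c else ' ')

theorem contains_hexSet (c : Char) : PySem.Set.contains pvHexSet c = isHexCharacter c := by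
  by_cases h : c ∈ pvHexdigits
  · rw [show isHexCharacter c = true by simpa [isHexCharacter]]
    simp [pvHexSet, PySem.Set.mem_ofList, h]
  · rw [show isHexCharacter c = false by simpa [isHexCharacter]]
    simp [pvHexSet]
    simpa [PySem.Set.mem_ofList] using h

-- relate loopA to split₀.go on the masked string
theorem loopA_eq_go :
    ∀ (cs : List Char), cs ≠ [] → ∀ (temp : List Char) (sum : Int) (acc : List (List Char)),
      loopA cs (sum, temp) + ((acc.reverse.map intOfHex)).sum
        = sum + (((PySem.Chars.split₀.go (maskB cs) temp.reverse acc).map intOfHex)).sum := by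
  intro cs
  induction cs with
  | nil => intro h; exact absurd rfl h
  | cons c rest ih =>
    intro _ temp sum acc
    by_cases hc : isHexCharacter c = true
    · have hm : maskB (c :: rest) = c :: maskB rest := by
        simp only [maskB, List.map_cons, contains_hexSet, hc, if_true]
      have hsp := hex_not_space c hc
      rw [hm, show PySem.Chars.split₀.go (c :: maskB rest) temp.reverse acc
            = PySem.Chars.split₀.go (maskB rest) (c :: temp.reverse) acc from by
          simp [PySem.Chars.split₀.go, hsp]]
      cases rest with
      | nil =>
        have hne : (c :: temp.reverse).isEmpty = false := rfl
        simp only [loopA, hc, if_true, maskB, List.map_nil, PySem.Chars.split₀.go, hne,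
          Bool.false_eq_true, if_false]
        simp
        ring
      | cons c2 rest' =>
        have h := ih (by simp) (temp ++ [c]) sum acc
        rw [show (temp ++ [c]).reverse = c :: temp.reverse from by simp] at h
        simpa only [loopA, hc, if_true] using h
    · have hc' : isHexCharacter c = false := by simpa using hc
      have hm : maskB (c :: rest) = ' ' :: maskB rest := by
        simp only [maskB, List.map_cons, contains_hexSet, hc', Bool.false_eq_true, if_false]
      rw [hm]
      by_cases ht : temp = []
      · subst ht
        rw [show PySem.Chars.split₀.go (' ' :: maskB rest) List.nil.reverse acc
              = PySem.Chars.split₀.go (maskB rest) [] acc from by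
            simp [PySem.Chars.split₀.go, show PySem.Chars.isspace ' ' = true from by decide]]
        cases rest with
        | nil =>
          simp [loopA, hc', maskB, PySem.Chars.split₀.go, intOfHex, hexDigitVal]
        | cons c2 rest' =>
          have h := ih (by simp) [] (sum + intOfHex ['0']) acc
          simpa only [loopA, hc', Bool.false_eq_true, if_false, List.isEmpty_nil, if_true,
            List.reverse_nil, show intOfHex ['0'] = (0 : Int) from rfl, add_zero] using h
      · have htr : (temp.reverse).isEmpty = false := by cases temp <;> simp_all
        have hte : temp.isEmpty = false := by cases temp <;> simp_all
        rw [show PySem.Chars.split₀.go (' ' :: maskB rest) temp.reverse acc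
              = PySem.Chars.split₀.go (maskB rest) [] (temp.reverse.reverse :: acc) from by
            simp only [PySem.Chars.split₀.go, htr, Bool.false_eq_true, if_false]
            simp [PySem.Chars.isspace]]
        rw [List.reverse_reverse]
        cases rest with
        | nil =>
          simp only [loopA, hc', Bool.false_eq_true, if_false, hte, maskB, List.map_nil,
            PySem.Chars.split₀.go, List.isEmpty_nil, if_true]
          simp
          ring
        | cons c2 rest' =>
          have h := ih (by simp) [] (sum + intOfHex temp) (temp :: acc)
          simp only [loopA, hc', Bool.false_eq_true, if_false, hte, List.reverse_nil] at h ⊢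
          simp only [List.reverse_cons, List.map_append, List.sum_append, List.map_cons,
            List.map_nil, List.sum_cons, List.sum_nil] at h
          omega

-- ===== VERDICT (by name: the statement is the Claim_ definition above) =====
theorem getSumOfHexValuesFromString_spec : Claim_equal_getSumOfHexValuesFromString := by
  intro s _
  unfold Spec_getSumOfHexValuesFromString
  unfold getSumOfHexValuesFromString getSumOfHexValuesFromString_alt
  cases hcs : s.toList with
  | nil =>
    simp [hcs, PySem.Chars.split₀, PySem.Chars.split₀.go]
  | cons c rest =>
    have hne : s.toList ≠ [] := by simp [hcs]
    rw [← hcs]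
    -- turn the indexed fold into a fold over enumerate
    have hlen : PySem.Str.len s = (s.toList.length : Int) := by simp
    have henum : PySem.List.enumerate s.toList 0
        = (PySem.List.pyRange 0 (PySem.List.len s.toList) 1).map
            (fun j => (j, PySem.List.pyGetD s.toList j ' ')) :=
      PySem.List.enumerate_eq_map_pyRange s.toList ' '
    have hfold :
        ((PySem.List.pyRange 0 (PySem.Str.len s) 1).foldl
            (fun st i => stepA (PySem.Str.len s) st i (PySem.List.pyGetD s.toList i ' '))
            ((0 : Int), ([] : List Char)))
        = ((PySem.List.enumerate s.toList 0).foldl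
            (fun st (p : Int × Char) => stepA (PySem.Str.len s) st p.1 p.2)
            ((0 : Int), ([] : List Char))) := by
      rw [henum, List.foldl_map]
      simp [PySem.List.len]
    simp only [hfold]
    rw [enumFold_eq_loopA (PySem.Str.len s) s.toList 0 0 [] (by simp)]
    have h := loopA_eq_go s.toList hne [] 0 []
    simp only [List.reverse_nil, List.map_nil, List.sum_nil, add_zero, zero_add] at h
    rw [h]
    simp [PySem.Chars.split₀, maskB]
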